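-- pv_equiv track=rewrite | github.com/yarnspinnered/code_jam_kickstart | 2017C/b/b.py | solve
-- ===== SOURCE A (Python) =====
-- def positions_of_X(line):
--     res = []
--     for i,c in enumerate(line):
--         if c == 'X':
--             res.append(i)
--     return tuple(res)
--
-- def solve(arr):
--     # pprint(arr)
--     single_count = 0
--     single_col = None
--     d = {}
--     for line in arr:
--         key = positions_of_X(line)
--         if len(key) == 1:
--             single_count += 1
--             single_col = key[0]
--         else:
--             if key in d:
--
--                 d[key] = d[key] +  1
--             else:
--                 d[key] = 1
--     for k,v in d.items():
--         if v != 2: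
--             return False
--     if single_count != 1:
--         return False
--
--     single_count = 0
--     for r in arr:
--         if r[single_col] == 'X':
--             single_count += 1
--     if single_count > 1:
--         return False
--     return True
-- ===== SOURCE B (Python) =====
-- def solve(arr):
--     singles = []            # X-columns of the rows that contain exactly one X
--     col_count = {}          # per-column count of X's over all rows
--     patterns = {}           # multiplicity of each non-single X-position pattern
--     for line in arr:
--         cols = [i for i, c in enumerate(line) if c == 'X']
--         for i in cols:
--             col_count[i] = col_count.get(i, 0) + 1
--         if len(cols) == 1:
--             singles.append(cols[0])
--         else:
--             key = tuple(cols)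
--             patterns[key] = patterns.get(key, 0) + 1
--     if any(v != 2 for v in patterns.values()):
--         return False
--     if len(singles) != 1:
--         return False
--     return col_count.get(singles[0], 0) <= 1
-- ===== Notes on version B (the rewrite author's own statement) =====
-- stated objective: alternative
-- what changed: B accumulates a per-column X counter (and the list of single-X columns) during the single first pass and replaces A's second scan of all rows with one dictionary lookup col_count.get(single_col, 0) <= 1.
import Mathlib
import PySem

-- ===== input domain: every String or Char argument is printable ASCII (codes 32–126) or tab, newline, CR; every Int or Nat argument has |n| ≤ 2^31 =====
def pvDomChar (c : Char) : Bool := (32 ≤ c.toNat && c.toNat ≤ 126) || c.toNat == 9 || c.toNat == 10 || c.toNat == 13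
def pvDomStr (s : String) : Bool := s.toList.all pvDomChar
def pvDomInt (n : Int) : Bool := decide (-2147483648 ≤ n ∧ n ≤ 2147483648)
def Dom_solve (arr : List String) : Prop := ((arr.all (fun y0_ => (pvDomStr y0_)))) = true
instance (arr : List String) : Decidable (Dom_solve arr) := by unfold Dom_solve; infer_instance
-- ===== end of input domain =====

-- B folds a per-column X counter into the single first pass and replaces A's second scan of all
-- rows by one table lookup (objective: alternative; equivalence is about the return value only).

-- ===== PORT A =====
def positionsOfX (line : String) : List Int :=
  (PySem.List.enumerate line.toList).foldl
    (fun res p => if p.2 = 'X' then res ++ [p.1] else res) []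

def solve (arr : List String) : Bool :=
  let st := arr.foldl
    (fun (st : Int × Option Int × PySem.Dict (List Int) Int) line =>
      let key := positionsOfX line
      if key.length = 1 then
        (st.1 + 1, some (PySem.List.pyGetD key 0 0), st.2.2)
      else if st.2.2.contains key then
        (st.1, st.2.1, st.2.2.insert key (st.2.2.getD key 0 + 1))
      else
        (st.1, st.2.1, st.2.2.insert key 1))
    ((0 : Int), (none : Option Int), (PySem.Dict.empty : PySem.Dict (List Int) Int))
  if st.2.2.items.any (fun kv => kv.2 ≠ 2) then false
  else if st.1 ≠ 1 then false
  else
    -- second loop: r[single_col] == 'X' (pyGet? = none is the IndexError case, excluded by Pre_)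
    let c := st.2.1.getD 0
    let cnt := arr.foldl
      (fun (n : Int) r => if PySem.Str.pyGet? r c = some 'X' then n + 1 else n) (0 : Int)
    if cnt > 1 then false else true

-- ===== PORT B =====
def colsOfX (line : String) : List Int :=
  ((PySem.List.enumerate line.toList).filter (fun p => p.2 == 'X')).map (fun p => p.1)

def solve_alt (arr : List String) : Bool :=
  let st := arr.foldl
    (fun (st : List Int × PySem.Dict Int Int × PySem.Dict (List Int) Int) line =>
      let cols := colsOfX line
      let cc := cols.foldl (fun cc i => cc.insert i (cc.getD i 0 + 1)) st.2.1
      if cols.length = 1 then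
        (st.1 ++ [PySem.List.pyGetD cols 0 0], cc, st.2.2)
      else
        (st.1, cc, st.2.2.insert cols (st.2.2.getD cols 0 + 1)))
    (([] : List Int), (PySem.Dict.empty : PySem.Dict Int Int),
      (PySem.Dict.empty : PySem.Dict (List Int) Int))
  if st.2.2.values.any (fun v => v ≠ 2) then false
  else if st.1.length ≠ 1 then false
  else decide (st.2.1.getD (PySem.List.pyGetD st.1 0 0) 0 ≤ 1)

-- ===== PRECONDITION & SPEC =====
-- Pre-side copy of the X-position pattern of a row (kept separate from the ports).
def xcolsP (line : String) : List Int :=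
  ((PySem.List.enumerate line.toList).filter (fun p => p.2 == 'X')).map (fun p => p.1)

-- Pre_ excludes exactly the inputs on which A raises IndexError: when exactly one row has a
-- single X and every other X-pattern occurs exactly twice, A indexes every row at that single
-- column, so a row shorter than that column makes A raise.
def Pre_solve (arr : List String) : Prop :=
  ((arr.filter (fun s => decide ((xcolsP s).length = 1))).length = 1 ∧
    ∀ s ∈ arr, (xcolsP s).length ≠ 1 →
      (arr.filter (fun t => xcolsP t == xcolsP s)).length = 2) →
  ∀ s ∈ arr, (xcolsP s).length = 1 → ∀ c ∈ xcolsP s, ∀ t ∈ arr, c < (t.toList.length : Int)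
instance (arr : List String) : Decidable (Pre_solve arr) := by unfold Pre_solve; infer_instance

def pvWitness_solve : List String := ["X.", "XX", "XX"]

def Spec_solve (arr : List String) (out : Bool) : Prop := out = solve_alt arr
instance (arr : List String) (out : Bool) : Decidable (Spec_solve arr out) := by
  unfold Spec_solve; infer_instance

-- ===== CLAIM (what is proved, stated in full; the proofs are below) =====
def Claim_equal_solve : Prop := ∀ (arr : List String), Dom_solve arr → Pre_solve arr → Spec_solve arr (solve arr)

-- ===== LEMMAS AND PROOFS =====

theorem pox_eq : positionsOfX = colsOfX := by
  funext s
  simp only [positionsOfX, colsOfX, PySem.List.foldl_append_ite, List.nil_append]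
  rw [List.filter_congr (l := PySem.List.enumerate s.toList)
    (q := fun p => p.2 == 'X') (fun x _ => by rw [Bool.eq_iff_iff]; simp)]

theorem xcolsP_eq : xcolsP = colsOfX := rfl

-- ---- generic fold shapes ----
theorem foldl_triple {β σ1 σ2 σ3 : Type} (f1 : σ1 → β → σ1) (f2 : σ2 → β → σ2)
    (f3 : σ3 → β → σ3) (l : List β) (a : σ1) (b : σ2) (c : σ3) :
    l.foldl (fun s e => (f1 s.1 e, f2 s.2.1 e, f3 s.2.2 e)) (a, b, c) =
      (l.foldl f1 a, l.foldl f2 b, l.foldl f3 c) := by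
  induction l generalizing a b c with
  | nil => rfl
  | cons x t ih => simp only [List.foldl_cons, ih]

theorem foldl_one {α : Type} (l : List α) (a : Int) :
    l.foldl (fun acc _ => acc + 1) a = a + l.length := by
  induction l generalizing a with
  | nil => simp
  | cons x t ih => simp only [List.foldl_cons, ih, List.length_cons]; push_cast; ring

-- ---- closed forms of the two ports ----
theorem solveA_eq (arr : List String) :
    solve arr =
      (let d := (arr.filter (fun s => decide (¬ (colsOfX s).length = 1))).foldl
          (fun d s => d.insert (colsOfX s) (d.getD (colsOfX s) 0 + 1))
          (PySem.Dict.empty : PySem.Dict (List Int) Int)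
       let sings := arr.filter (fun s => decide ((colsOfX s).length = 1))
       if d.items.any (fun kv => kv.2 ≠ 2) then false
       else if ((sings.length : Int)) ≠ 1 then false
       else
         let c := (sings.foldl (fun c s => some (PySem.List.pyGetD (colsOfX s) 0 0)) none).getD 0
         let cnt := arr.foldl
           (fun (n : Int) r => if PySem.Str.pyGet? r c = some 'X' then n + 1 else n) (0 : Int)
         if cnt > 1 then false else true) := by
  rw [solve]
  simp only [pox_eq]
  have hstep :
      (fun (st : Int × Option Int × PySem.Dict (List Int) Int) line =>
        let key := colsOfX line
        if key.length = 1 then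
          (st.1 + 1, some (PySem.List.pyGetD key 0 0), st.2.2)
        else if st.2.2.contains key then
          (st.1, st.2.1, st.2.2.insert key (st.2.2.getD key 0 + 1))
        else
          (st.1, st.2.1, st.2.2.insert key 1)) =
      (fun (st : Int × Option Int × PySem.Dict (List Int) Int) line =>
        ((fun (sc : Int) line => if (colsOfX line).length = 1 then sc + 1 else sc) st.1 line,
         (fun (c : Option Int) line => if (colsOfX line).length = 1 then
            some (PySem.List.pyGetD (colsOfX line) 0 0) else c) st.2.1 line,
         (fun (d : PySem.Dict (List Int) Int) line => if (colsOfX line).length = 1 then d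
            else d.insert (colsOfX line) (d.getD (colsOfX line) 0 + 1)) st.2.2 line)) := by
    funext st line
    by_cases h : (colsOfX line).length = 1
    · simp [h]
    · simp only [h, if_false]
      by_cases hc : st.2.2.contains (colsOfX line)
      · simp [hc]
      · have hc' : st.2.2.contains (colsOfX line) = false := by simpa using hc
        rw [PySem.Dict.getD_of_not_contains _ _ hc']
        norm_num
  rw [hstep, foldl_triple
    (f1 := fun (sc : Int) line => if (colsOfX line).length = 1 then sc + 1 else sc)
    (f2 := fun (c : Option Int) line => if (colsOfX line).length = 1 then
      some (PySem.List.pyGetD (colsOfX line) 0 0) else c)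
    (f3 := fun (d : PySem.Dict (List Int) Int) line => if (colsOfX line).length = 1 then d
      else d.insert (colsOfX line) (d.getD (colsOfX line) 0 + 1))]
  have h3 : (fun (d : PySem.Dict (List Int) Int) line => if (colsOfX line).length = 1 then d
      else d.insert (colsOfX line) (d.getD (colsOfX line) 0 + 1)) =
      (fun (d : PySem.Dict (List Int) Int) line => if ¬ (colsOfX line).length = 1 then
        d.insert (colsOfX line) (d.getD (colsOfX line) 0 + 1) else d) := by
    funext d line
    by_cases h : (colsOfX line).length = 1 <;> simp [h]
  rw [h3, PySem.List.foldl_ite_eq_foldl_filter (p := fun line => ¬ (colsOfX line).length = 1),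
    PySem.List.foldl_ite_eq_foldl_filter (p := fun line => (colsOfX line).length = 1)
      (f := fun (sc : Int) _ => sc + 1),
    PySem.List.foldl_ite_eq_foldl_filter (p := fun line => (colsOfX line).length = 1)
      (f := fun (c : Option Int) s => some (PySem.List.pyGetD (colsOfX s) 0 0)),
    foldl_one]
  simp only [zero_add]

theorem solveB_eq (arr : List String) :
    solve_alt arr =
      (let d := (arr.filter (fun s => decide (¬ (colsOfX s).length = 1))).foldl
          (fun d s => d.insert (colsOfX s) (d.getD (colsOfX s) 0 + 1))
          (PySem.Dict.empty : PySem.Dict (List Int) Int)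
       let singsL := (arr.filter (fun s => decide ((colsOfX s).length = 1))).map
          (fun s => PySem.List.pyGetD (colsOfX s) 0 0)
       let cc := arr.foldl (fun cc line => (colsOfX line).foldl
          (fun (cc : PySem.Dict Int Int) i => cc.insert i (cc.getD i 0 + 1)) cc)
          (PySem.Dict.empty : PySem.Dict Int Int)
       if d.values.any (fun v => v ≠ 2) then false
       else if singsL.length ≠ 1 then false
       else decide (cc.getD (PySem.List.pyGetD singsL 0 0) 0 ≤ 1)) := by
  rw [solve_alt]
  have hstep :
      (fun (st : List Int × PySem.Dict Int Int × PySem.Dict (List Int) Int) line =>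
        let cols := colsOfX line
        let cc := cols.foldl (fun cc i => cc.insert i (cc.getD i 0 + 1)) st.2.1
        if cols.length = 1 then
          (st.1 ++ [PySem.List.pyGetD cols 0 0], cc, st.2.2)
        else
          (st.1, cc, st.2.2.insert cols (st.2.2.getD cols 0 + 1))) =
      (fun (st : List Int × PySem.Dict Int Int × PySem.Dict (List Int) Int) line =>
        ((fun (l : List Int) line => if (colsOfX line).length = 1 then
            l ++ [PySem.List.pyGetD (colsOfX line) 0 0] else l) st.1 line,
         (fun (cc : PySem.Dict Int Int) line => (colsOfX line).foldl
            (fun cc i => cc.insert i (cc.getD i 0 + 1)) cc) st.2.1 line,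
         (fun (d : PySem.Dict (List Int) Int) line => if (colsOfX line).length = 1 then d
            else d.insert (colsOfX line) (d.getD (colsOfX line) 0 + 1)) st.2.2 line)) := by
    funext st line
    by_cases h : (colsOfX line).length = 1 <;> simp [h]
  rw [hstep, foldl_triple
    (f1 := fun (l : List Int) line => if (colsOfX line).length = 1 then
      l ++ [PySem.List.pyGetD (colsOfX line) 0 0] else l)
    (f2 := fun (cc : PySem.Dict Int Int) line => (colsOfX line).foldl
      (fun cc i => cc.insert i (cc.getD i 0 + 1)) cc)
    (f3 := fun (d : PySem.Dict (List Int) Int) line => if (colsOfX line).length = 1 then d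
      else d.insert (colsOfX line) (d.getD (colsOfX line) 0 + 1))]
  have h3 : (fun (d : PySem.Dict (List Int) Int) line => if (colsOfX line).length = 1 then d
      else d.insert (colsOfX line) (d.getD (colsOfX line) 0 + 1)) =
      (fun (d : PySem.Dict (List Int) Int) line => if ¬ (colsOfX line).length = 1 then
        d.insert (colsOfX line) (d.getD (colsOfX line) 0 + 1) else d) := by
    funext d line
    by_cases h : (colsOfX line).length = 1 <;> simp [h]
  rw [h3, PySem.List.foldl_ite_eq_foldl_filter (p := fun line => ¬ (colsOfX line).length = 1),
    PySem.List.foldl_append_ite (p := fun line => (colsOfX line).length = 1)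
      (f := fun s => PySem.List.pyGetD (colsOfX s) 0 0)]
  simp only [List.nil_append]
  rfl

-- d.values.any = d.items.any on the second component
theorem values_any_eq (d : PySem.Dict (List Int) Int) :
    d.values.any (fun v => v ≠ 2) = d.items.any (fun kv => kv.2 ≠ 2) := by
  show (d.items.map (fun kv => kv.2)).any (fun v => decide (v ≠ 2)) = _
  rw [List.any_map]
  rfl

-- ---- the per-column counter ----
theorem cc_getD (l : List String) (cc : PySem.Dict Int Int) (c : Int) :
    (l.foldl (fun cc line => (colsOfX line).foldl
        (fun (cc : PySem.Dict Int Int) i => cc.insert i (cc.getD i 0 + 1)) cc) cc).getD c 0 =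
      cc.getD c 0 + (l.map (fun s => ((colsOfX s).count c : Int))).sum := by
  induction l generalizing cc with
  | nil => simp
  | cons x t ih =>
    simp only [List.foldl_cons, ih, List.map_cons, List.sum_cons,
      PySem.Dict.getD_foldl_insert_add_one]
    ring

-- ---- the X-position pattern of a single row ----
theorem nodup_colsOfX (r : String) : (colsOfX r).Nodup := by
  have h1 : (List.filter (fun p => p.2 == 'X')
      (PySem.List.enumerate r.toList 0)).Pairwise (fun p q => p.1 < q.1) :=
    List.Pairwise.sublist (List.filter_sublist) (PySem.List.pairwise_lt_enumerate r.toList 0)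
  have h2 : (colsOfX r).Pairwise (· < ·) :=
    List.Pairwise.map (fun (p : Int × Char) => p.1) (fun a b h => h) h1
  exact List.Pairwise.imp (fun h => ne_of_lt h) h2

theorem mem_colsOfX (r : String) (c : Int) :
    c ∈ colsOfX r ↔ ∃ k : Nat, c = (k : Int) ∧ r.toList[k]? = some 'X' := by
  constructor
  · intro h
    obtain ⟨p, hp, hpc⟩ := List.mem_map.1 h
    obtain ⟨hmem, hX⟩ := List.mem_filter.1 hp
    obtain ⟨k, hk, hpk⟩ := (PySem.List.mem_enumerate_iff _ _ _).1 hmem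
    refine ⟨k, ?_, ?_⟩
    · rw [← hpc, hpk]; simp
    · have : p.2 = 'X' := by simpa using hX
      rw [List.getElem?_eq_some_iff]
      exact ⟨hk, by rw [← this, hpk]⟩
  · rintro ⟨k, rfl, hget⟩
    obtain ⟨hk, hX⟩ := List.getElem?_eq_some_iff.1 hget
    refine List.mem_map.2 ⟨((k : Int), r.toList[k]), ?_, by simp⟩
    refine List.mem_filter.2 ⟨?_, by simp [hX]⟩
    exact (PySem.List.mem_enumerate_iff _ _ _).2 ⟨k, hk, by simp⟩

theorem count_colsOfX (r : String) (c : Int) (h0 : 0 ≤ c) (h1 : c < (r.toList.length : Int)) :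
    (colsOfX r).count c = if PySem.Str.pyGet? r c = some 'X' then 1 else 0 := by
  have hg : PySem.Str.pyGet? r c = some r.toList[c.toNat] := by
    show PySem.List.pyGet? r.toList c = _
    exact PySem.List.pyGet?_eq_some_getElem _ h0 h1
  have hlt : c.toNat < r.toList.length := by omega
  by_cases hX : r.toList[c.toNat] = 'X'
  · rw [List.count_eq_one_of_mem (nodup_colsOfX r)
      ((mem_colsOfX r c).2 ⟨c.toNat, by omega, by rw [List.getElem?_eq_getElem hlt, hX]⟩)]
    rw [hg, hX]
    simp
  · rw [List.count_eq_zero.2 ?_, if_neg ?_]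
    · rw [hg]
      exact fun h => hX (by simpa using h)
    · intro hmem
      obtain ⟨k, hck, hgk⟩ := (mem_colsOfX r c).1 hmem
      obtain ⟨hk, hXk⟩ := List.getElem?_eq_some_iff.1 hgk
      have hck' : c.toNat = k := by omega
      subst hck'
      exact hX hXk

theorem cnt_eq (c : Int) (h0 : 0 ≤ c) (l : List String) (a : Int)
    (hb : ∀ t ∈ l, c < (t.toList.length : Int)) :
    l.foldl (fun (n : Int) r => if PySem.Str.pyGet? r c = some 'X' then n + 1 else n) a =
      a + (l.map (fun s => ((colsOfX s).count c : Int))).sum := by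
  induction l generalizing a with
  | nil => simp
  | cons x t ih =>
    simp only [List.foldl_cons, List.map_cons, List.sum_cons]
    rw [ih _ (fun u hu => hb u (List.mem_cons_of_mem _ hu)),
      count_colsOfX x c h0 (hb x List.mem_cons_self)]
    split_ifs with h <;> push_cast <;> ring

-- ---- A's dict check implies each multi pattern occurs exactly twice ----
theorem multi_two (arr : List String)
    (hA1 : ¬ (((arr.filter (fun s => decide (¬ (colsOfX s).length = 1))).foldl
        (fun d s => d.insert (colsOfX s) (d.getD (colsOfX s) 0 + 1))
        (PySem.Dict.empty : PySem.Dict (List Int) Int)).items.any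
          (fun kv => decide (kv.2 ≠ 2)) = true)) :
    ∀ s ∈ arr, (colsOfX s).length ≠ 1 →
      (arr.filter (fun t => colsOfX t == colsOfX s)).length = 2 := by
  intro s hs hlen
  set mk := arr.filter (fun x => decide (¬ (colsOfX x).length = 1)) with hmk
  set D := mk.foldl (fun d s => d.insert (colsOfX s) (d.getD (colsOfX s) 0 + 1))
    (PySem.Dict.empty : PySem.Dict (List Int) Int) with hD
  have hDmap : D = (mk.map colsOfX).foldl
      (fun d k => d.insert k (d.getD k 0 + 1)) PySem.Dict.empty := by
    rw [hD, List.foldl_map]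
  have hget : ∀ K, D.getD K 0 = ((mk.map colsOfX).count K : Int) := by
    intro K
    rw [hDmap, PySem.Dict.getD_foldl_insert_add_one, PySem.Dict.getD_empty, zero_add]
  have hsmk : s ∈ mk := List.mem_filter.2 ⟨hs, by simpa using hlen⟩
  have hKmem : colsOfX s ∈ mk.map colsOfX := List.mem_map.2 ⟨s, hsmk, rfl⟩
  have hcnt_pos : 0 < (mk.map colsOfX).count (colsOfX s) := List.count_pos_iff.2 hKmem
  have hc : D.contains (colsOfX s) = true := by
    by_contra h
    have h' : D.contains (colsOfX s) = false := by simpa using h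
    have := PySem.Dict.getD_of_not_contains D (0 : Int) h'
    rw [hget] at this
    omega
  have hex : ∃ v, D.get? (colsOfX s) = some v := by
    rw [PySem.Dict.contains_eq_isSome_get?] at hc
    exact Option.isSome_iff_exists.1 hc
  obtain ⟨v, hv⟩ := hex
  have hv2 : v = 2 := by
    have hmem := PySem.Dict.mem_items_of_get?_eq_some D hv
    have hall : ∀ (a : List Int) (b : Int), (a, b) ∈ D.items → b = 2 := by simpa using hA1
    exact hall _ _ hmem
  have hcount : ((mk.map colsOfX).count (colsOfX s) : Int) = 2 := by
    rw [← hget, PySem.Dict.getD_of_get?_eq_some D 0 hv, hv2]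
  have hcount2 : (mk.map colsOfX).count (colsOfX s) = 2 := by omega
  have hstep : (mk.map colsOfX).count (colsOfX s) =
      (mk.filter (fun t => colsOfX t == colsOfX s)).length := by
    rw [List.count_eq_countP, List.countP_map, ← List.countP_eq_length_filter]
    rfl
  have hff : mk.filter (fun t => colsOfX t == colsOfX s) =
      arr.filter (fun t => colsOfX t == colsOfX s) := by
    rw [hmk, List.filter_filter]
    apply List.filter_congr
    intro x hx
    by_cases hq : colsOfX x == colsOfX s
    · have hxK : colsOfX x = colsOfX s := by simpa using hq
      simp [hxK, hlen]
    · simp [hq]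
  rw [← hff, ← hstep, hcount2]

theorem solve_spec : Claim_equal_solve := by
  intro arr _ hpre
  unfold Spec_solve
  rw [solveA_eq, solveB_eq]
  unfold Pre_solve at hpre
  simp only [xcolsP_eq] at hpre
  dsimp only
  rw [values_any_eq]
  by_cases h1 : (((arr.filter (fun s => decide (¬ (colsOfX s).length = 1))).foldl
      (fun d s => d.insert (colsOfX s) (d.getD (colsOfX s) 0 + 1))
      (PySem.Dict.empty : PySem.Dict (List Int) Int)).items.any
        (fun kv => decide (kv.2 ≠ 2)) = true)
  · rw [if_pos h1, if_pos h1]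
  · rw [if_neg h1, if_neg h1]
    by_cases h2 : (arr.filter (fun s => decide ((colsOfX s).length = 1))).length = 1
    · obtain ⟨s, hf⟩ := List.length_eq_one_iff.1 h2
      have hsfil : s ∈ arr.filter (fun s => decide ((colsOfX s).length = 1)) := by
        rw [hf]; exact List.mem_cons_self
      have hsarr : s ∈ arr := List.mem_of_mem_filter hsfil
      have hslen : (colsOfX s).length = 1 := by
        have := (List.mem_filter.1 hsfil).2
        simpa using this
      obtain ⟨c0, hc0⟩ := List.length_eq_one_iff.1 hslen
      have hc0mem : c0 ∈ colsOfX s := by rw [hc0]; exact List.mem_cons_self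
      have h0 : 0 ≤ c0 := by
        obtain ⟨k, hk, -⟩ := (mem_colsOfX s c0).1 hc0mem
        omega
      have hb : ∀ t ∈ arr, c0 < (t.toList.length : Int) :=
        hpre ⟨h2, multi_two arr h1⟩ s hsarr hslen c0 hc0mem
      have hAlen : ¬ (((arr.filter (fun s => decide ((colsOfX s).length = 1))).length : Int) ≠ 1) := by
        rw [h2]; norm_num
      have hBlen : ¬ (((arr.filter (fun s => decide ((colsOfX s).length = 1))).map
          (fun s => PySem.List.pyGetD (colsOfX s) 0 0)).length ≠ 1) := by
        simp [h2]
      rw [if_neg hAlen, if_neg hBlen, hf]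
      simp only [List.map_cons, List.map_nil, List.foldl_cons, List.foldl_nil,
        Option.getD_some, hc0, PySem.List.pyGetD_zero_cons]
      rw [cnt_eq c0 h0 arr 0 hb, cc_getD arr PySem.Dict.empty c0, PySem.Dict.getD_empty]
      by_cases hS : ((0 : Int) + (arr.map (fun s => ((colsOfX s).count c0 : Int))).sum > 1)
      · rw [if_pos hS, eq_comm, decide_eq_false_iff_not]
        omega
      · rw [if_neg hS, eq_comm, decide_eq_true_eq]
        omega
    · have hA : ((arr.filter (fun s => decide ((colsOfX s).length = 1))).length : Int) ≠ 1 := by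
        exact_mod_cast h2
      have hB : ((arr.filter (fun s => decide ((colsOfX s).length = 1))).map
          (fun s => PySem.List.pyGetD (colsOfX s) 0 0)).length ≠ 1 := by
        simpa using h2
      rw [if_pos hA, if_pos hB]
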